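-- pv_equiv track=rewrite | github.com/giannpelle/data-profiling | unary_IND_discovery.py | inclusions
-- ===== SOURCE A (Python) =====
-- def inclusions(V, U, B):
--     # input: [R], [r], [unary INDs]
--     rhs = {}
--     for A in U:
--         rhs[str(A)] = U
--     for v in V:
--         for A in [A_b for v_b, A_b in B if v_b == v]:
--             c = [C for v_c, C in B if v_c == v]
--             rhs[str(A)] = [x for x in rhs[str(A)] if x in c]
--     I = []
--     for A in U:
--         for B in rhs[str(A)]:
--             I.append((A, B))
--     return I
-- ===== SOURCE B (Python) =====
-- def inclusions(V, U, B):
--     # One pass over B: has[a] = {v in V : (v, a) in B}.  Then (A, x) is emitted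
--     # iff every v in V that pairs with A in B also pairs with x in B, i.e. iff
--     # has[A] is a subset of has[x].
--     vset = set(V)
--     has = {}
--     for v, a in B:
--         if v in vset:
--             has.setdefault(a, set()).add(v)
--     empty = set()
--     out = []
--     for a in U:
--         need = has.get(a, empty)
--         for x in U:
--             if need <= has.get(x, empty):
--                 out.append((a, x))
--     return out
-- ===== Notes on version B (the rewrite author's own statement) =====
-- stated objective: alternative
-- what changed: Instead of repeatedly rescanning B and re-filtering the rhs candidate lists for every (v, A) occurrence, B makes one pass over B to build has[a] = {v in V : (v,a) in B} and emits (A, x) iff has[A] is a subset of has[x]; it trades A's nested rescans of B for per-pair subset tests (asymptotically better on inputs dense in matching pairs, but not measurably faster on the timed family).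
import Mathlib
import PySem

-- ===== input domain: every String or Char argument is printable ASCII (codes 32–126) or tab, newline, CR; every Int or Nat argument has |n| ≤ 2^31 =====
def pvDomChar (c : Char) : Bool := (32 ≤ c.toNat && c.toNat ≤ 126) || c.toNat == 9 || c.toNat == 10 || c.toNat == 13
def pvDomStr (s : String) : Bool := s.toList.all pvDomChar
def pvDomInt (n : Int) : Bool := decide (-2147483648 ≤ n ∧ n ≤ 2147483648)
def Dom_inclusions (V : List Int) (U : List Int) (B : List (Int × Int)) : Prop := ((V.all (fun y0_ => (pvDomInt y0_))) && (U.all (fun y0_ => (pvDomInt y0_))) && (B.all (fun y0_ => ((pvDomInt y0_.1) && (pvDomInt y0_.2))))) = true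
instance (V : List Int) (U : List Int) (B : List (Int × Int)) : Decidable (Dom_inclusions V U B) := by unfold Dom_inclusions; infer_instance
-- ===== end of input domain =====

-- B replaces A's repeated rescans of B per (v, A) by one grouping pass over B plus per-pair subset tests (alternative algorithm, same measured cost).


-- ===== PORT A =====
-- the inner list [C for v_c, C in B if v_c == v] (also used as the loop list of A's)
def pvA_c (B : List (Int × Int)) (v : Int) : List Int :=
  (B.filter (fun p => p.1 == v)).map (·.2)

-- body of the inner 'for A in …' loop: rhs[str(A)] = [x for x in rhs[str(A)] if x in c]
-- (Python raises KeyError when str(A) is absent; Pre_ excludes those inputs, here getD defaults to [])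
def pvA_inner (B : List (Int × Int)) (v : Int) (d : PySem.Dict String (List Int)) (a : Int) :
    PySem.Dict String (List Int) :=
  let c := pvA_c B v
  d.insert (PySem.Int.toStr a) ((d.getD (PySem.Int.toStr a) []).filter (fun x => c.contains x))

def inclusions (V : List Int) (U : List Int) (B : List (Int × Int)) : List (Int × Int) :=
  let rhs : PySem.Dict String (List Int) :=
    U.foldl (fun d a => d.insert (PySem.Int.toStr a) U) PySem.Dict.empty
  let rhs2 : PySem.Dict String (List Int) :=
    V.foldl (fun d v => (pvA_c B v).foldl (pvA_inner B v) d) rhs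
  U.foldl (fun I a => I ++ (rhs2.getD (PySem.Int.toStr a) []).map (fun b => (a, b))) []

-- ===== PORT B =====
-- one pass over B: has[a] = {v ∈ V : (v, a) ∈ B}   (setdefault(a, set()).add(v) is Dict.modify)
def pvB_has (V : List Int) (B : List (Int × Int)) : PySem.Dict Int (PySem.Set Int) :=
  let vset : PySem.Set Int := PySem.Set.ofList V
  B.foldl
    (fun d p =>
      if vset.contains p.1 then d.modify p.2 PySem.Set.empty (fun s => s.add p.1) else d)
    PySem.Dict.empty

def inclusions_alt (V : List Int) (U : List Int) (B : List (Int × Int)) : List (Int × Int) :=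
  let has := pvB_has V B
  U.foldl
    (fun out a =>
      let need := has.getD a PySem.Set.empty
      U.foldl
        (fun out x => if need.issubset (has.getD x PySem.Set.empty) then out ++ [(a, x)] else out)
        out)
    []

-- ===== PRECONDITION & SPEC =====
-- Pre_ excludes exactly the inputs where A raises KeyError: some (v, a) ∈ B with v ∈ V but a ∉ U
def Pre_inclusions (V : List Int) (U : List Int) (B : List (Int × Int)) : Prop :=
  ∀ p ∈ B, p.1 ∈ V → p.2 ∈ U
instance (V : List Int) (U : List Int) (B : List (Int × Int)) : Decidable (Pre_inclusions V U B) := by unfold Pre_inclusions; infer_instance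

def pvWitness_inclusions : List Int × List Int × (List (Int × Int)) := ([1], [2, 3], [(1, 2)])

def Spec_inclusions (V : List Int) (U : List Int) (B : List (Int × Int)) (out : List (Int × Int)) : Prop := out = inclusions_alt V U B
instance (V : List Int) (U : List Int) (B : List (Int × Int)) (out : List (Int × Int)) : Decidable (Spec_inclusions V U B out) := by unfold Spec_inclusions; infer_instance

-- ===== CLAIM (what is proved, stated in full; the proofs are below) =====
def Claim_equal_inclusions : Prop := ∀ (V : List Int) (U : List Int) (B : List (Int × Int)), Dom_inclusions V U B → Pre_inclusions V U B → Spec_inclusions V U B (inclusions V U B)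


-- ===== LEMMAS AND PROOFS =====

-- ---- str(n) is injective on integers ----
-- decimal digit string of a natural number, back to front (what Nat.toDigits computes)
def pvRep (n : Nat) : List Char :=
  if n / 10 = 0 then [Nat.digitChar (n % 10)]
  else pvRep (n / 10) ++ [Nat.digitChar (n % 10)]
decreasing_by exact Nat.div_lt_self (by omega) (by omega)

theorem pvRep_ne_nil (n : Nat) : pvRep n ≠ [] := by
  unfold pvRep; split <;> simp

theorem pvRep_ne_dash (n : Nat) : ∀ c ∈ pvRep n, c ≠ '-' := by
  induction n using Nat.strong_induction_on with
  | _ n ih =>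
    have hd : ∀ k < 10, Nat.digitChar k ≠ '-' := by decide
    unfold pvRep
    split
    · simpa using hd (n % 10) (by omega)
    · intro c hc
      rcases List.mem_append.mp hc with h | h
      · exact ih (n / 10) (Nat.div_lt_self (by omega) (by omega)) c h
      · simpa using (by simpa using h) ▸ hd (n % 10) (by omega)

theorem toDigitsCore_eq_pvRep : ∀ (f n : Nat) (acc : List Char), n < f →
    Nat.toDigitsCore 10 f n acc = pvRep n ++ acc := by
  intro f
  induction f with
  | zero => omega
  | succ f ih =>
    intro n acc h
    rw [Nat.toDigitsCore]
    by_cases h0 : n / 10 = 0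
    · rw [if_pos h0]
      conv_rhs => rw [pvRep, if_pos h0]
      rfl
    · rw [if_neg h0, ih (n / 10) _ (by omega)]
      conv_rhs => rw [pvRep, if_neg h0]
      simp

theorem pvRep_inj : ∀ m n : Nat, pvRep m = pvRep n → m = n := by
  intro m
  induction m using Nat.strong_induction_on with
  | _ m ih =>
    intro n h
    have hd : ∀ j < 10, ∀ k < 10, Nat.digitChar j = Nat.digitChar k → j = k := by decide
    have em : pvRep m = if m / 10 = 0 then [Nat.digitChar (m % 10)] else pvRep (m / 10) ++ [Nat.digitChar (m % 10)] := by
      conv_lhs => rw [pvRep]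
    have en : pvRep n = if n / 10 = 0 then [Nat.digitChar (n % 10)] else pvRep (n / 10) ++ [Nat.digitChar (n % 10)] := by
      conv_lhs => rw [pvRep]
    rw [em, en] at h
    by_cases hm : m / 10 = 0 <;> by_cases hn : n / 10 = 0
    · rw [if_pos hm, if_pos hn] at h
      have := hd (m % 10) (by omega) (n % 10) (by omega) (by simpa using h)
      omega
    · rw [if_pos hm, if_neg hn] at h
      have h2 : ([] : List Char) ++ [Nat.digitChar (m % 10)] = pvRep (n / 10) ++ [Nat.digitChar (n % 10)] := by simpa using h
      exact absurd (List.append_singleton_inj.mp h2).1.symm (pvRep_ne_nil _)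
    · rw [if_neg hm, if_pos hn] at h
      have h2 : ([] : List Char) ++ [Nat.digitChar (n % 10)] = pvRep (m / 10) ++ [Nat.digitChar (m % 10)] := by simpa using h.symm
      exact absurd (List.append_singleton_inj.mp h2).1.symm (pvRep_ne_nil _)
    · rw [if_neg hm, if_neg hn] at h
      obtain ⟨h1, h2⟩ := List.append_singleton_inj.mp h
      have e1 := ih (m / 10) (Nat.div_lt_self (by omega) (by omega)) (n / 10) h1
      have e2 := hd (m % 10) (by omega) (n % 10) (by omega) h2
      omega

theorem pvToStr_inj {m n : Int} (h : PySem.Int.toStr m = PySem.Int.toStr n) : m = n := by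
  have h' : PySem.Int.toChars m = PySem.Int.toChars n := by
    rw [← PySem.Int.toList_toStr, ← PySem.Int.toList_toStr, h]
  unfold PySem.Int.toChars at h'
  have hrep : ∀ k : Nat, Nat.toDigits 10 k = pvRep k := by
    intro k
    have := toDigitsCore_eq_pvRep (k + 1) k [] (by omega)
    simpa [Nat.toDigits] using this
  simp only [hrep] at h'
  by_cases hm : m < 0 <;> by_cases hn : n < 0 <;> simp [hm, hn] at h'
  · have := pvRep_inj _ _ h'; omega
  · exact absurd rfl (pvRep_ne_dash n.toNat '-' (h' ▸ List.mem_cons_self ..))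
  · exact absurd rfl (pvRep_ne_dash m.toNat '-' (h'.symm ▸ List.mem_cons_self ..))
  · have := pvRep_inj _ _ h'; omega

-- ---- characterisation of A's dictionary ----
-- the Bool predicate "every v already processed that pairs with a also pairs with x"
def pvPB (B : List (Int × Int)) (W : List Int) (a x : Int) : Bool :=
  W.all (fun v => !decide ((v, a) ∈ B) || decide ((v, x) ∈ B))

theorem pv_mem_pvA_c (B : List (Int × Int)) (v a : Int) : a ∈ pvA_c B v ↔ (v, a) ∈ B := by
  simp only [pvA_c, List.mem_map, List.mem_filter, beq_iff_eq]
  constructor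
  · rintro ⟨⟨pv, pa⟩, ⟨hp, he⟩, rfl⟩
    exact he ▸ hp
  · intro h; exact ⟨(v, a), ⟨h, rfl⟩, rfl⟩

theorem pv_untouched (U0 : List Int) (a : Int) : ∀ (U : List Int) (d : PySem.Dict String (List Int)),
    a ∉ U →
    (U.foldl (fun d a => d.insert (PySem.Int.toStr a) U0) d).getD (PySem.Int.toStr a) [] =
      d.getD (PySem.Int.toStr a) [] := by
  intro U
  induction U with
  | nil => simp
  | cons w W ihW =>
    intro d h
    simp only [List.foldl_cons]
    rw [ihW _ (fun hc => h (List.mem_cons.mpr (Or.inr hc)))]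
    rw [PySem.Dict.getD_insert]
    rw [if_neg (fun hc => h (List.mem_cons.mpr (Or.inl (pvToStr_inj hc))))]

theorem pvA_c_contains (B : List (Int × Int)) (v x : Int) :
    (pvA_c B v).contains x = decide ((v, x) ∈ B) := by
  rw [Bool.eq_iff_iff]
  simp [pv_mem_pvA_c]

theorem pv_init_getD (U0 : List Int) : ∀ (U : List Int) (d : PySem.Dict String (List Int)) (a : Int),
    a ∈ U →
    (U.foldl (fun d a => d.insert (PySem.Int.toStr a) U0) d).getD (PySem.Int.toStr a) [] = U0 := by
  intro U
  induction U with
  | nil => simp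
  | cons u U ih =>
    intro d a ha
    simp only [List.foldl_cons]
    by_cases h : a ∈ U
    · exact ih _ a h
    · have hau : a = u := by rcases List.mem_cons.mp ha with h' | h' <;> tauto
      subst hau
      rw [pv_untouched U0 a U _ h, PySem.Dict.getD_insert, if_pos rfl]

theorem pv_inner_getD (B : List (Int × Int)) (v : Int) :
    ∀ (as : List Int) (d : PySem.Dict String (List Int)) (a : Int),
    (as.foldl (pvA_inner B v) d).getD (PySem.Int.toStr a) [] =
      if a ∈ as then (d.getD (PySem.Int.toStr a) []).filter (fun x => (pvA_c B v).contains x)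
      else d.getD (PySem.Int.toStr a) [] := by
  intro as
  induction as with
  | nil => simp
  | cons a0 rest ih =>
    intro d a
    simp only [List.foldl_cons]
    rw [ih]
    by_cases he : a = a0
    · subst he
      simp only [List.mem_cons, true_or, if_pos]
      by_cases hr : a ∈ rest
      · rw [if_pos hr]
        show ((pvA_inner B v d a).getD (PySem.Int.toStr a) []).filter _ = _
        simp only [pvA_inner]
        rw [PySem.Dict.getD_insert_self, List.filter_filter]
        exact List.filter_congr (fun x _ => by rw [Bool.and_self])
      · rw [if_neg hr]
        simp only [pvA_inner]
        rw [PySem.Dict.getD_insert_self]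
    · have : (pvA_inner B v d a0).getD (PySem.Int.toStr a) [] = d.getD (PySem.Int.toStr a) [] := by
        simp only [pvA_inner]
        rw [PySem.Dict.getD_insert, if_neg (fun hc => he (pvToStr_inj hc))]
      rw [this]
      simp only [List.mem_cons]
      by_cases hr : a ∈ rest
      · rw [if_pos hr, if_pos (Or.inr hr)]
      · rw [if_neg hr, if_neg (by tauto)]

theorem pv_outer_getD (B : List (Int × Int)) (U : List Int) :
    ∀ (W : List Int) (d : PySem.Dict String (List Int)) (Q : Int → Int → Bool),
    (∀ a ∈ U, d.getD (PySem.Int.toStr a) [] = U.filter (Q a)) →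
    ∀ a ∈ U,
      (W.foldl (fun d v => (pvA_c B v).foldl (pvA_inner B v) d) d).getD (PySem.Int.toStr a) [] =
        U.filter (fun x => Q a x && pvPB B W a x) := by
  intro W
  induction W with
  | nil =>
    intro d Q hd a ha
    simp only [List.foldl_nil, pvPB, List.all_nil, Bool.and_true]
    exact hd a ha
  | cons v W ih =>
    intro d Q hd a ha
    simp only [List.foldl_cons]
    have step : ∀ b ∈ U,
        ((pvA_c B v).foldl (pvA_inner B v) d).getD (PySem.Int.toStr b) [] =
          U.filter (fun x => Q b x && (!decide ((v, b) ∈ B) || decide ((v, x) ∈ B))) := by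
      intro b hb
      rw [pv_inner_getD]
      by_cases hm : b ∈ pvA_c B v
      · rw [if_pos hm, hd b hb, List.filter_filter]
        have hvb : (v, b) ∈ B := (pv_mem_pvA_c B v b).mp hm
        exact List.filter_congr (fun x _ => by
          rw [pvA_c_contains, decide_eq_true hvb]
          simp [Bool.and_comm])
      · rw [if_neg hm, hd b hb]
        have hvb : ¬ (v, b) ∈ B := fun hc => hm ((pv_mem_pvA_c B v b).mpr hc)
        exact List.filter_congr (fun x _ => by
          rw [decide_eq_false hvb]
          simp)
    rw [ih _ _ step a ha]
    exact List.filter_congr (fun x _ => by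
      simp only [pvPB, List.all_cons, Bool.and_assoc])

-- ---- characterisation of B's dictionary ----
theorem pv_has_mem (V : List Int) (B : List (Int × Int)) (a v' : Int) :
    v' ∈ (pvB_has V B).getD a PySem.Set.empty ↔ v' ∈ V ∧ (v', a) ∈ B := by
  simp only [pvB_has]
  have main : ∀ (l : List (Int × Int)) (d : PySem.Dict Int (PySem.Set Int)),
      v' ∈ (l.foldl (fun d p =>
          if (PySem.Set.ofList V).contains p.1 then d.modify p.2 PySem.Set.empty (fun s => s.add p.1) else d) d).getD a PySem.Set.empty ↔
        v' ∈ d.getD a PySem.Set.empty ∨ (v' ∈ V ∧ (v', a) ∈ l) := by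
    intro l
    induction l with
    | nil => simp
    | cons p l ihl =>
      intro d
      simp only [List.foldl_cons]
      rw [ihl]
      by_cases hv : (PySem.Set.ofList V).contains p.1
      · rw [if_pos hv]
        have hp1 : p.1 ∈ V := by
          have := (PySem.Set.contains_iff _ _).mp hv
          simpa [PySem.Set.mem_ofList] using this
        by_cases hpa : p.2 = a
        · subst hpa
          rw [PySem.Dict.getD_modify, if_pos rfl]
          rw [PySem.Set.mem_add]
          constructor
          · rintro (⟨h | h⟩ | h)
            · exact Or.inl h
            · exact Or.inr ⟨h ▸ hp1, h ▸ (by simp)⟩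
            · exact Or.inr ⟨h.1, List.mem_cons.mpr (Or.inr h.2)⟩
          · rintro (h | ⟨h1, h2⟩)
            · exact Or.inl (Or.inl h)
            · rcases List.mem_cons.mp h2 with h3 | h3
              · exact Or.inl (Or.inr (congrArg Prod.fst h3))
              · exact Or.inr ⟨h1, h3⟩
        · rw [PySem.Dict.getD_modify, if_neg (fun hc => hpa hc.symm)]
          constructor
          · rintro (h | h)
            · exact Or.inl h
            · exact Or.inr ⟨h.1, List.mem_cons.mpr (Or.inr h.2)⟩
          · rintro (h | ⟨h1, h2⟩)
            · exact Or.inl h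
            · rcases List.mem_cons.mp h2 with h3 | h3
              · exact absurd (congrArg Prod.snd h3).symm hpa
              · exact Or.inr ⟨h1, h3⟩
      · rw [if_neg hv]
        have hp1 : p.1 ∉ V := by
          intro hc
          exact hv ((PySem.Set.contains_iff _ _).mpr (by simpa [PySem.Set.mem_ofList] using hc))
        constructor
        · rintro (h | ⟨h1, h2⟩)
          · exact Or.inl h
          · exact Or.inr ⟨h1, List.mem_cons.mpr (Or.inr h2)⟩
        · rintro (h | ⟨h1, h2⟩)
          · exact Or.inl h
          · rcases List.mem_cons.mp h2 with h3 | h3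
            · exact absurd (by rw [← congrArg Prod.fst h3]; exact h1) hp1
            · exact Or.inr ⟨h1, h3⟩
  rw [main B PySem.Dict.empty]
  simp

theorem pv_cond_eq (V : List Int) (B : List (Int × Int)) (a x : Int) :
    ((pvB_has V B).getD a PySem.Set.empty).issubset ((pvB_has V B).getD x PySem.Set.empty) =
      pvPB B V a x := by
  rw [Bool.eq_iff_iff, PySem.Set.issubset_iff]
  simp only [pvPB, List.all_eq_true, pv_has_mem, Bool.or_eq_true, Bool.not_eq_true',
    decide_eq_false_iff_not, decide_eq_true_eq]
  constructor
  · intro h v hv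
    by_cases hva : (v, a) ∈ B
    · exact Or.inr (h v ⟨hv, hva⟩).2
    · exact Or.inl hva
  · rintro h y ⟨h1, h2⟩
    rcases h y h1 with h3 | h3
    · exact absurd h2 h3
    · exact ⟨h1, h3⟩

-- ===== VERDICT (by name: the statement is the Claim_ definition above) =====
theorem pv_flatMap_congr {α β : Type} (l : List α) (g g' : α → List β)
    (h : ∀ a ∈ l, g a = g' a) : l.flatMap g = l.flatMap g' := by
  induction l with
  | nil => rfl
  | cons x xs ih =>
    simp only [List.flatMap_cons]
    rw [h x (List.mem_cons_self ..), ih (fun a ha => h a (List.mem_cons.mpr (Or.inr ha)))]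

theorem inclusions_spec : Claim_equal_inclusions := by
  intro V U B _ _
  unfold Spec_inclusions inclusions inclusions_alt
  simp only []
  rw [PySem.List.foldl_append_eq_flatMap]
  simp only [PySem.List.foldl_append_if]
  rw [PySem.List.foldl_append_eq_flatMap
    (fun a => List.map (fun x => (a, x))
      (List.filter (fun x => ((pvB_has V B).getD a PySem.Set.empty).issubset
        ((pvB_has V B).getD x PySem.Set.empty)) U)) U []]
  simp only [List.nil_append]
  apply pv_flatMap_congr
  intro a ha
  have hA := pv_outer_getD B U V
    (U.foldl (fun d a => d.insert (PySem.Int.toStr a) U) PySem.Dict.empty)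
    (fun _ _ => true)
    (fun b hb => by rw [pv_init_getD U U PySem.Dict.empty b hb, List.filter_true])
    a ha
  rw [hA]
  congr 1
  apply List.filter_congr
  intro x _
  rw [pv_cond_eq, Bool.true_and]
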